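-- pv_equiv track=rewrite | github.com/Kaluza05/Studia | zimowy24-25/wstep do pythona/lista8/z3.py | cartesian_prod
-- ===== SOURCE A (Python) =====
-- def cartesian_prod(A,B,word_c):
--     pairs = set()
--     for a in A:
--         for b in B:
--             bool_val = True
--             a_c = {i:list(a).count(i) for i in a}
--             b_c = {i:list(b).count(i) for i in b}
--             for i in word_c:
--                 a_cnt = a_c[i] if i in a_c else 0
--                 b_cnt = b_c[i] if i in b_c else 0
--                 if word_c[i]-a_cnt-b_cnt != 0:
--                     bool_val = False
--                     break
--             if bool_val:
--                 pairs.add((a,b))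
--
--     return pairs
-- ===== SOURCE B (Python) =====
-- def cartesian_prod(A, B, word_c):
--     keys = list(word_c)
--     target = [word_c[k] for k in keys]
--
--     def vec(w):
--         c = {}
--         for ch in w:
--             c[ch] = c.get(ch, 0) + 1
--         return tuple(c.get(k, 0) for k in keys)
--
--     groups = {}
--     for b in B:
--         groups.setdefault(vec(b), []).append(b)
--
--     pairs = set()
--     for a in A:
--         va = vec(a)
--         need = tuple(t - x for t, x in zip(target, va))
--         for b in groups.get(need, ()):
--             pairs.add((a, b))
--     return pairs
-- ===== Notes on version B (the rewrite author's own statement) =====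
-- stated objective: faster
-- what changed: B counts each word once, groups B by its count-vector over word_c's keys in a hash map, and for each a looks up the complement vector, instead of A's recounting both words and rechecking every key for every (a,b) pair.
import Mathlib
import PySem

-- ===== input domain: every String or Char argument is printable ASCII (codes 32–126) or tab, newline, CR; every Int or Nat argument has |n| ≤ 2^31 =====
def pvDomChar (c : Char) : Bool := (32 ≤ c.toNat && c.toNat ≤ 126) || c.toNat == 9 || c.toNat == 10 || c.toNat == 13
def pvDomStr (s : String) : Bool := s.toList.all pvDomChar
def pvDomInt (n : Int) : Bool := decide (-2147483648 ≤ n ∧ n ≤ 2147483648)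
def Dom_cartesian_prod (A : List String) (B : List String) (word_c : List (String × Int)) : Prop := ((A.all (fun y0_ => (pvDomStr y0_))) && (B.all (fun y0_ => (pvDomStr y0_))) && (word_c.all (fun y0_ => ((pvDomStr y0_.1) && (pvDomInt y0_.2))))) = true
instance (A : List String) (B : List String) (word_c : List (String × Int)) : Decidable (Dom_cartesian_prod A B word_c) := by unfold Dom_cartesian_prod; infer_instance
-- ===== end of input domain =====

-- B counts each word once and groups B by its count-vector over word_c's keys, looking up each a's
-- complement vector, instead of A's per-pair recount and key-by-key recheck (objective: faster).

-- ===== PORT A =====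
-- a_c = {i: list(a).count(i) for i in a}  (keys are the one-character strings of a)
def pvA_charCounts (w : String) : PySem.Dict String Int :=
  w.toList.foldl (fun d c => d.insert (String.mk [c]) ((w.toList.count c : Int))) PySem.Dict.empty

def cartesian_prod (A : List String) (B : List String) (word_c : List (String × Int)) : List (String × String) :=
  let wc := PySem.Dict.ofList word_c
  A.foldl (fun pairs a =>
    B.foldl (fun pairs b =>
      let a_c := pvA_charCounts a
      let b_c := pvA_charCounts b
      -- 'for i in word_c: if word_c[i]-a_cnt-b_cnt != 0: bool_val = False; break'; the break only
      -- skips iterations that could again set False, so the plain fold computes the same bool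
      let bool_val := wc.keys.foldl (fun ok i =>
        if (wc.getD i 0 - a_c.getD i 0 - b_c.getD i 0) != 0 then false else ok) true
      if bool_val then PySem.Set.add pairs (a, b) else pairs) pairs)
    PySem.Set.empty

-- ===== PORT B =====
-- vec(w): count w's characters once, then read the counts off at word_c's keys
def pvB_vec (keys : List String) (w : String) : List Int :=
  let c := w.toList.foldl (fun d ch => d.modify (String.mk [ch]) 0 (· + 1)) PySem.Dict.empty
  keys.map (fun k => c.getD k 0)

def cartesian_prod_alt (A : List String) (B : List String) (word_c : List (String × Int)) : List (String × String) :=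
  let wc := PySem.Dict.ofList word_c
  let keys := wc.keys
  let target := keys.map (fun k => wc.getD k 0)
  -- groups.setdefault(vec(b), []).append(b)
  let groups := B.foldl (fun g b => g.modify (pvB_vec keys b) [] (· ++ [b])) PySem.Dict.empty
  A.foldl (fun pairs a =>
    let need := ((target.zip (pvB_vec keys a)).map (fun p => p.1 - p.2))
    (groups.getD need []).foldl (fun pairs b => PySem.Set.add pairs (a, b)) pairs)
    PySem.Set.empty

-- ===== PRECONDITION & SPEC =====
def Spec_cartesian_prod (A : List String) (B : List String) (word_c : List (String × Int)) (out : List (String × String)) : Prop := out = cartesian_prod_alt A B word_c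
instance (A : List String) (B : List String) (word_c : List (String × Int)) (out : List (String × String)) : Decidable (Spec_cartesian_prod A B word_c out) := by unfold Spec_cartesian_prod; infer_instance

-- ===== CLAIM (what is proved, stated in full; the proofs are below) =====
def Claim_equal_cartesian_prod : Prop := ∀ (A : List String) (B : List String) (word_c : List (String × Int)), Dom_cartesian_prod A B word_c → Spec_cartesian_prod A B word_c (cartesian_prod A B word_c)

-- ===== LEMMAS AND PROOFS =====

-- the count of the string k in the one-character-string image of a char list
def pvCountS (l : List Char) (k : String) : Int :=
  ((l.map (fun c => String.mk [c])).count k : Int)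

lemma pv_toList_mk (l : List Char) : (String.mk l).toList = l :=
  Eq.symm ((fun {l} {s} => String.ofList_eq.mp) rfl)

lemma pv_mk_inj : Function.Injective (fun c : Char => String.mk [c]) := by
  intro a b h
  have := congrArg String.toList h
  simpa [pv_toList_mk] using this

lemma pvCountS_eq (l : List Char) (k : String) :
    pvCountS l k = (match k.toList with
      | [c] => ((l.count c : Nat) : Int)
      | _ => 0) := by
  unfold pvCountS
  cases hk : k.toList with
  | nil =>
    have : k ∉ l.map (fun c => String.mk [c]) := by
      intro hm
      obtain ⟨c, _, hc⟩ := List.mem_map.mp hm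
      rw [← hc, pv_toList_mk] at hk; cases hk
    simp [List.count_eq_zero.mpr this]
  | cons c t =>
    cases t with
    | nil =>
      have hkk : k = String.mk [c] := by
        rw [← String.toList_inj, pv_toList_mk, hk]
      subst hkk
      simp [List.count_map_of_injective _ _ pv_mk_inj]
    | cons d t' =>
      have : k ∉ l.map (fun c => String.mk [c]) := by
        intro hm
        obtain ⟨c', _, hc⟩ := List.mem_map.mp hm
        rw [← hc, pv_toList_mk] at hk; cases hk
      simp [List.count_eq_zero.mpr this]

-- the dict comprehension {i: list(w).count(i) for i in w}, looked up with default 0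
lemma pv_getD_foldl_insert_mk (l : List Char) (f : Char → Int) (d : PySem.Dict String Int) (k : String) :
    (l.foldl (fun d c => d.insert (String.mk [c]) (f c)) d).getD k 0 =
      (match k.toList with
      | [c] => if c ∈ l then f c else d.getD k 0
      | _ => d.getD k 0) := by
  induction l generalizing d with
  | nil => cases hk : k.toList with
    | nil => simp
    | cons c t => cases t <;> simp
  | cons c l ih =>
    rw [List.foldl_cons, ih]
    cases hk : k.toList with
    | nil =>
      simp only []
      rw [PySem.Dict.getD_insert_of_ne]
      intro h; rw [h, pv_toList_mk] at hk; cases hk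
    | cons c' t =>
      cases t with
      | nil =>
        by_cases hm : c' ∈ l
        · simp [hm]
        · simp only [hm, if_false, List.mem_cons]
          rw [PySem.Dict.getD_insert]
          by_cases he : c' = c
          · subst he
            have : k = String.mk [c'] := by rw [← String.toList_inj, pv_toList_mk, hk]
            simp [this, hm]
          · have : k ≠ String.mk [c] := by
              intro h; rw [h, pv_toList_mk] at hk; injection hk with h1 _; exact he h1.symm
            simp [this, he, hm]
      | cons d' t' =>
        simp only []
        rw [PySem.Dict.getD_insert_of_ne]
        intro h; rw [h, pv_toList_mk] at hk; cases hk

lemma pvA_charCounts_getD (w : String) (k : String) :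
    (pvA_charCounts w).getD k 0 = pvCountS w.toList k := by
  rw [pvA_charCounts, pv_getD_foldl_insert_mk, pvCountS_eq]
  cases hk : k.toList with
  | nil => simp
  | cons c t =>
    cases t with
    | nil =>
      by_cases hm : c ∈ w.toList
      · simp [hm]
      · simp [hm, List.count_eq_zero.mpr hm]
    | cons d t' => simp

lemma pvB_vec_eq (keys : List String) (w : String) :
    pvB_vec keys w = keys.map (fun k => pvCountS w.toList k) := by
  unfold pvB_vec
  simp only []
  apply List.map_congr_left
  intro k _
  have h := List.foldl_map (f := fun c : Char => String.mk [c])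
    (g := fun (d : PySem.Dict String Int) (s : String) => d.modify s 0 (· + 1))
    (l := w.toList) (init := PySem.Dict.empty)
  rw [← h, PySem.Dict.getD_foldl_modify_add_one]
  simp [pvCountS]

lemma pv_groups_getD (B : List String) (keys : List String) (v : List Int) :
    (B.foldl (fun g b => g.modify (pvB_vec keys b) [] (· ++ [b])) PySem.Dict.empty).getD v []
      = B.filter (fun b => pvB_vec keys b == v) := by
  have h := List.foldl_map (f := fun b : String => (pvB_vec keys b, b))
    (g := fun (g : PySem.Dict (List Int) (List String)) (p : List Int × String) => g.modify p.1 [] (· ++ [p.2]))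
    (l := B) (init := PySem.Dict.empty)
  rw [← h, PySem.Dict.getD_foldl_modify_append]
  simp [List.filter_map, Function.comp_def]

-- A's key-by-key check equals B's complement-vector comparison
lemma pv_cond_eq (wc : PySem.Dict String Int) (a b : String) :
    (wc.keys.foldl (fun ok i =>
        if (wc.getD i 0 - (pvA_charCounts a).getD i 0 - (pvA_charCounts b).getD i 0) != 0 then false else ok) true)
    = (pvB_vec wc.keys b == ((wc.keys.map (fun k => wc.getD k 0)).zip (pvB_vec wc.keys a)).map (fun p => p.1 - p.2)) := by
  rw [PySem.List.foldl_if_false_eq]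
  rw [pvB_vec_eq, pvB_vec_eq, List.zip_map', List.map_map]
  simp only [pvA_charCounts_getD]
  rw [Bool.eq_iff_iff]
  simp only [Bool.true_and, Bool.not_eq_eq_eq_not, Bool.not_true, List.any_eq_false, bne_iff_ne,
    ne_eq, Decidable.not_not, beq_iff_eq, List.map_inj_left, Function.comp_def]
  constructor <;> intro h i hi <;> have := h i hi <;> omega

lemma pv_main_eq (A B : List String) (word_c : List (String × Int)) :
    cartesian_prod A B word_c = cartesian_prod_alt A B word_c := by
  simp only [cartesian_prod, cartesian_prod_alt]
  apply PySem.List.foldl_congr_mem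
  intro pairs a _
  rw [pv_groups_getD]
  rw [PySem.List.foldl_if_eq_foldl_filter
    (p := fun b => (PySem.Dict.ofList word_c).keys.foldl (fun ok i =>
      if ((PySem.Dict.ofList word_c).getD i 0 - (pvA_charCounts a).getD i 0 - (pvA_charCounts b).getD i 0) != 0 then false else ok) true)]
  congr 1
  apply List.filter_congr
  intro b _
  exact pv_cond_eq (PySem.Dict.ofList word_c) a b

-- ===== VERDICT (by name: the statement is the Claim_ definition above) =====
theorem cartesian_prod_spec : Claim_equal_cartesian_prod := by
  intro A B word_c _
  exact pv_main_eq A B word_c
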